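-- pv_equiv track=rewrite | github.com/mhBahrami/CarND-Traffic-Sign-Classifier-Project | helper.py | get_trans_indices
-- ===== SOURCE A (Python) =====
-- from collections import Counter
--
-- def get_trans_indices(X, y, name):
--     min_number = {'tr':900, 'va': 150, 'ts':300 }
--     _X_trans_idx=[]
--     _set = Counter(y)
--
--     for i, idx in enumerate(y):
--         if(_set[idx] < min_number[name]):
--             _X_trans_idx.append(i)
--             _set[idx]+=1
--         if(_set[idx] < min_number[name]):
--             _X_trans_idx.append(i)
--             _set[idx]+=1
--         if(_set[idx] < min_number[name]):
--             _X_trans_idx.append(i)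
--             _set[idx]+=1
--         if(_set[idx] < min_number[name]):
--             _X_trans_idx.append(i)
--             _set[idx]+=1
--
--     return Counter(_X_trans_idx)
-- ===== SOURCE B (Python) =====
-- from collections import Counter
--
--
-- def get_trans_indices(X, y, name):
--     min_number = {'tr': 900, 'va': 150, 'ts': 300}
--     pairs = []
--     for c in dict.fromkeys(y):  # distinct classes, first-occurrence order
--         idxs = [i for i, v in enumerate(y) if v == c]
--         deficit = max(0, min_number[name] - len(idxs))
--         q, r = divmod(deficit, 4)
--         full = min(q, len(idxs))
--         pairs += [(i, 4) for i in idxs[:full]]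
--         if r and full < len(idxs):
--             pairs.append((idxs[full], r))
--     pairs.sort(key=lambda p: p[0])
--     return Counter(dict(pairs))
-- ===== Notes on version B (the rewrite author's own statement) =====
-- stated objective: alternative
-- what changed: B replaces A's interleaved single pass (four unrolled compare-increment-append blocks over a mutating Counter) by staged per-class passes: it collects each distinct class's index list, computes that class's whole plan in closed form with divmod (a prefix of indices getting 4 plus one remainder index), then sorts the collected (index, count) pairs by index and returns them as a Counter.
import Mathlib
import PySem

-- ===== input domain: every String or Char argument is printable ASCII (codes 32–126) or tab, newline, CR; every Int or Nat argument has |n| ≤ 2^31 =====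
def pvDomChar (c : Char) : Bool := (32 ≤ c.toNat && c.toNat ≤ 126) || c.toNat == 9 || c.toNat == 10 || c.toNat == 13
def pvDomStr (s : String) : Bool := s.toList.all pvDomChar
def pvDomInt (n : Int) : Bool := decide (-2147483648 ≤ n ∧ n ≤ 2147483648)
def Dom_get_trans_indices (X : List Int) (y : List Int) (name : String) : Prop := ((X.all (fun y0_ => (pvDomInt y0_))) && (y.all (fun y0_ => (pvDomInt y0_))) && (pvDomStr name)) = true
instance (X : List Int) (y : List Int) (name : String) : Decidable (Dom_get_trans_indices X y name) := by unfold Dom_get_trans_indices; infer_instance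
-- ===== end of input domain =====

-- B replaces A's interleaved single pass (four unrolled compare-increment-append blocks over a
-- mutating Counter) by staged per-class passes: for each distinct class it computes the whole
-- augmentation plan in closed form with divmod (full-4 prefix + one remainder index), then sorts
-- the collected pairs by index (objective: alternative; return-value equivalence).


-- ===== PORT A =====
-- loop body of A: the four identical 'if _set[idx] < min_number[name]: append i; _set[idx] += 1' blocks
def stepA (mn : Int) (st : PySem.Dict Int Int × List Int) (p : Int × Int) :
    PySem.Dict Int Int × List Int :=
  let i := p.1
  let idx := p.2
  let st := if st.1.getD idx 0 < mn then (st.1.modify idx 0 (· + 1), st.2 ++ [i]) else st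
  let st := if st.1.getD idx 0 < mn then (st.1.modify idx 0 (· + 1), st.2 ++ [i]) else st
  let st := if st.1.getD idx 0 < mn then (st.1.modify idx 0 (· + 1), st.2 ++ [i]) else st
  let st := if st.1.getD idx 0 < mn then (st.1.modify idx 0 (· + 1), st.2 ++ [i]) else st
  st

def get_trans_indices (X : List Int) (y : List Int) (name : String) : List (Int × Int) :=
  let min_number : PySem.Dict String Int :=
    PySem.Dict.ofList [("tr", 900), ("va", 150), ("ts", 300)]
  -- min_number[name]: the KeyError on other names (reached only when y ≠ []) is excluded by Pre_
  let st := (PySem.List.enumerate y 0).foldl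
    (stepA ((min_number.get? name).getD 0)) (PySem.Dict.counter y, ([] : List Int))
  (PySem.Dict.counter st.2).items

-- ===== PORT B =====
-- loop body of B, one class c: closed-form plan via divmod, appended to the accumulated pairs
def planB (mn : Int) (y : List Int) (pairs : List (Int × Int)) (c : Int) : List (Int × Int) :=
  -- idxs = [i for i, v in enumerate(y) if v == c]
  let idxs := ((PySem.List.enumerate y 0).filter (fun p => p.2 == c)).map Prod.fst
  let deficit := max 0 (mn - (idxs.length : Int))
  -- q, r = divmod(deficit, 4)
  let q := PySem.Int.floordiv deficit 4
  let r := PySem.Int.mod deficit 4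
  let full := min q (idxs.length : Int)
  -- pairs += [(i, 4) for i in idxs[:full]]
  let pairs := pairs ++ (PySem.List.slice idxs none (some full)).map (fun i => (i, (4 : Int)))
  -- if r and full < len(idxs): pairs.append((idxs[full], r))   (idxs[full] in range: full < len)
  if r ≠ 0 ∧ full < (idxs.length : Int) then
    pairs ++ (match PySem.List.pyGet? idxs full with
              | some i => [(i, r)]
              | none => [])
  else pairs

def get_trans_indices_alt (X : List Int) (y : List Int) (name : String) : List (Int × Int) :=
  let min_number : PySem.Dict String Int :=
    PySem.Dict.ofList [("tr", 900), ("va", 150), ("ts", 300)]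
  -- for c in dict.fromkeys(y): distinct classes in first-occurrence order
  -- min_number[name]: KeyError on other names (reached only when y ≠ []) is excluded by Pre_
  let pairs := (PySem.List.dedup y).foldl (planB ((min_number.get? name).getD 0) y) []
  -- pairs.sort(key=lambda p: p[0])
  let pairs := PySem.List.sorted pairs (fun p => p.1) false
  -- Counter(dict(pairs))
  (PySem.Dict.ofList pairs).items

-- ===== PRECONDITION & SPEC =====
-- Pre_ excludes exactly the inputs on which A raises KeyError: an unknown name together with a
-- nonempty y (both programs raise there; with y = [] the lookup is never reached).
def Pre_get_trans_indices (X : List Int) (y : List Int) (name : String) : Prop :=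
  y = [] ∨ name = "tr" ∨ name = "va" ∨ name = "ts"
instance (X : List Int) (y : List Int) (name : String) : Decidable (Pre_get_trans_indices X y name) := by unfold Pre_get_trans_indices; infer_instance

def pvWitness_get_trans_indices : List Int × List Int × String := ([7, 8], [5, 5, 6], "ts")

def Spec_get_trans_indices (X : List Int) (y : List Int) (name : String) (out : List (Int × Int)) : Prop := out = get_trans_indices_alt X y name
instance (X : List Int) (y : List Int) (name : String) (out : List (Int × Int)) : Decidable (Spec_get_trans_indices X y name out) := by unfold Spec_get_trans_indices; infer_instance

-- ===== CLAIM (what is proved, stated in full; the proofs are below) =====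
def Claim_equal_get_trans_indices : Prop := ∀ (X : List Int) (y : List Int) (name : String), Dom_get_trans_indices X y name → Pre_get_trans_indices X y name → Spec_get_trans_indices X y name (get_trans_indices X y name)

-- ===== LEMMAS AND PROOFS =====

-- the per-index quota A hands out: min(4, remaining deficit of the class)
def addv (mn dc : Int) : Int := min 4 (max 0 (mn - dc))

-- abstract form of A's loop: at position s with class c it emits (s, addv) if nonzero and
-- bumps the class counter
def absA (mn : Int) : List Int → Int → PySem.Dict Int Int → List (Int × Int)
  | [], _, _ => []
  | c :: t, s, d =>
      (if addv mn (d.getD c 0) = 0 then [] else [(s, addv mn (d.getD c 0))])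
        ++ absA mn t (s + 1) (d.insert c (d.getD c 0 + addv mn (d.getD c 0)))

-- abstract form of B's per-class plan: walk the class's indices handing out min(4, D)
def clsPairsD : Int → List Int → List (Int × Int)
  | _, [] => []
  | D, i :: rest => (if min 4 D = 0 then [] else [(i, min 4 D)]) ++ clsPairsD (D - min 4 D) rest

-- positions of class c in ys, enumerated from s (B's idxs list)
def posList (c : Int) (ys : List Int) (s : Int) : List Int :=
  ((PySem.List.enumerate ys s).filter (fun p => p.2 == c)).map Prod.fst

-- B's divmod closed form for one class
def closedB (D : Int) (idxs : List Int) : List (Int × Int) :=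
  (PySem.List.slice idxs none (some (min (PySem.Int.floordiv D 4) (idxs.length : Int)))).map
      (fun i => (i, (4 : Int)))
    ++ (if PySem.Int.mod D 4 ≠ 0 ∧ min (PySem.Int.floordiv D 4) (idxs.length : Int) < (idxs.length : Int) then
          (match PySem.List.pyGet? idxs (min (PySem.Int.floordiv D 4) (idxs.length : Int)) with
           | some i => [(i, PySem.Int.mod D 4)]
           | none => [])
        else [])

-- Counter's `d[k] += 1` is an insert of the bumped value (definitional)
lemma modify_eq_insert_add_one (d : PySem.Dict Int Int) (k : Int) :
    d.modify k 0 (· + 1) = d.insert k (d.getD k 0 + 1) := rfl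

-- A's four-if block, in closed form: with k = min 4 (max 0 (mn - count)), it appends i k times
-- and bumps the class counter by k.
lemma stepA_snd (mn : Int) (d : PySem.Dict Int Int) (acc : List Int) (i c : Int) :
    (stepA mn (d, acc) (i, c)).2
      = acc ++ List.replicate (min 4 (max 0 (mn - d.getD c 0))).toNat i := by
  by_cases h1 : d.getD c 0 < mn
  · by_cases h2 : d.getD c 0 + 1 < mn
    · by_cases h3 : d.getD c 0 + 1 + 1 < mn
      · by_cases h4 : d.getD c 0 + 1 + 1 + 1 < mn
        · rw [show (min 4 (max 0 (mn - d.getD c 0))).toNat = 4 by omega]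
          simp [stepA, modify_eq_insert_add_one, PySem.Dict.getD_insert_self, h1, h2, h3, h4,
            List.replicate]
        · rw [show (min 4 (max 0 (mn - d.getD c 0))).toNat = 3 by omega]
          simp [stepA, modify_eq_insert_add_one, PySem.Dict.getD_insert_self, h1, h2, h3, h4,
            List.replicate]
      · rw [show (min 4 (max 0 (mn - d.getD c 0))).toNat = 2 by omega]
        simp [stepA, modify_eq_insert_add_one, PySem.Dict.getD_insert_self, h1, h2, h3,
          List.replicate]
    · rw [show (min 4 (max 0 (mn - d.getD c 0))).toNat = 1 by omega]
      simp [stepA, modify_eq_insert_add_one, PySem.Dict.getD_insert_self, h1, h2,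
        List.replicate]
  · rw [show (min 4 (max 0 (mn - d.getD c 0))).toNat = 0 by omega]
    simp [stepA, h1]

lemma stepA_fst_getD (mn : Int) (d : PySem.Dict Int Int) (acc : List Int) (i c x : Int) :
    (stepA mn (d, acc) (i, c)).1.getD x 0
      = if x = c then d.getD c 0 + min 4 (max 0 (mn - d.getD c 0)) else d.getD x 0 := by
  by_cases h1 : d.getD c 0 < mn
  · by_cases h2 : d.getD c 0 + 1 < mn
    · by_cases h3 : d.getD c 0 + 1 + 1 < mn
      · by_cases h4 : d.getD c 0 + 1 + 1 + 1 < mn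
        · simp [stepA, modify_eq_insert_add_one, PySem.Dict.getD_insert_self, h1, h2, h3, h4,
            PySem.Dict.getD_insert]
          split_ifs <;> omega
        · simp [stepA, modify_eq_insert_add_one, PySem.Dict.getD_insert_self, h1, h2, h3, h4,
            PySem.Dict.getD_insert]
          split_ifs <;> omega
      · simp [stepA, modify_eq_insert_add_one, PySem.Dict.getD_insert_self, h1, h2, h3,
          PySem.Dict.getD_insert]
        split_ifs <;> omega
    · simp [stepA, modify_eq_insert_add_one, PySem.Dict.getD_insert_self, h1, h2,
        PySem.Dict.getD_insert]
      split_ifs <;> omega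
  · simp [stepA, h1]
    intro h
    subst h
    omega

-- Counter of a list extended by k fresh copies of i appends one item (i, k)
lemma counter_append_replicate (acc : List Int) (i : Int) (h : i ∉ acc) :
    ∀ (k : Nat),
    (PySem.Dict.counter (acc ++ List.replicate k i)).items
      = (PySem.Dict.counter acc).items ++ (if k = 0 then [] else [(i, (k : Int))]) := by
  intro k
  induction k with
  | zero => simp
  | succ k ih =>
    rw [List.replicate_succ', ← List.append_assoc, PySem.Dict.counter_append_singleton]
    have hget : (PySem.Dict.counter (acc ++ List.replicate k i)).getD i 0 = (k : Int) := by
      rw [PySem.Dict.getD_counter]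
      simp [List.count_append, List.count_eq_zero_of_not_mem h]
    have hmod : (PySem.Dict.counter (acc ++ List.replicate k i)).modify i 0 (· + 1)
        = (PySem.Dict.counter (acc ++ List.replicate k i)).insert i ((k : Int) + 1) := by
      rw [show ((PySem.Dict.counter (acc ++ List.replicate k i)).modify i 0 (· + 1))
          = (PySem.Dict.counter (acc ++ List.replicate k i)).insert i
              ((PySem.Dict.counter (acc ++ List.replicate k i)).getD i 0 + 1) from rfl, hget]
    rw [hmod]
    by_cases hk : k = 0
    · subst hk
      have hc : (PySem.Dict.counter (acc ++ List.replicate 0 i)).contains i = false := by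
        rw [PySem.Dict.contains_counter]
        simp [h]
      rw [PySem.Dict.items_insert_of_not_contains _ _ hc]
      simp
    · have hc : (PySem.Dict.counter (acc ++ List.replicate k i)).contains i = true := by
        rw [PySem.Dict.contains_counter]
        simp [List.mem_replicate, hk]
      rw [PySem.Dict.items_insert_of_contains _ _ hc, ih, List.map_append]
      have hmap : List.map (fun p => if (p.1 == i) = true then (i, (k : Int) + 1) else p)
          (PySem.Dict.counter acc).items = (PySem.Dict.counter acc).items := by
        conv_rhs => rw [← List.map_id ((PySem.Dict.counter acc).items)]
        apply List.map_congr_left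
        intro p hp
        have : p.1 ∈ (PySem.Dict.counter acc).keys := PySem.Dict.mem_keys_of_mem_items _ hp
        rw [PySem.Dict.keys_counter] at this
        have : p.1 ∈ acc := (PySem.Set.mem_ofList _ _).mp this
        have : p.1 ≠ i := fun e => h (e ▸ this)
        simp [this]
      rw [hmap]
      simp [hk]

-- the second component of A's fold depends on the dict only through getD
lemma foldA_snd_congr (mn : Int) :
    ∀ (ys : List Int) (s : Int) (d₁ d₂ : PySem.Dict Int Int) (acc : List Int),
      (∀ c, d₁.getD c 0 = d₂.getD c 0) →
      ((PySem.List.enumerate ys s).foldl (stepA mn) (d₁, acc)).2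
        = ((PySem.List.enumerate ys s).foldl (stepA mn) (d₂, acc)).2 := by
  intro ys
  induction ys with
  | nil => intro s d₁ d₂ acc h; simp [PySem.List.enumerate_nil]
  | cons c t ih =>
    intro s d₁ d₂ acc h
    rw [PySem.List.enumerate_cons]
    simp only [List.foldl_cons]
    rcases h1 : stepA mn (d₁, acc) (s, c) with ⟨e₁, a₁⟩
    rcases h2 : stepA mn (d₂, acc) (s, c) with ⟨e₂, a₂⟩
    have ha : a₁ = a₂ := by
      have t1 := stepA_snd mn d₁ acc s c
      have t2 := stepA_snd mn d₂ acc s c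
      rw [h1] at t1; rw [h2] at t2
      simp only [] at t1 t2
      rw [show a₁ = (e₁, a₁).2 from rfl, show a₂ = (e₂, a₂).2 from rfl] at *
      rw [t1, t2, h c]
    subst ha
    apply ih
    intro x
    have t1 := stepA_fst_getD mn d₁ acc s c x
    have t2 := stepA_fst_getD mn d₂ acc s c x
    rw [h1] at t1; rw [h2] at t2
    rw [t1, t2, h c, h x]

-- A's fold produces exactly absA (as Counter items)
lemma countA (mn : Int) :
    ∀ (ys : List Int) (s : Int) (dA : PySem.Dict Int Int) (acc : List Int),
      (∀ x ∈ acc, x < s) →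
      (PySem.Dict.counter (((PySem.List.enumerate ys s).foldl (stepA mn) (dA, acc)).2)).items
        = (PySem.Dict.counter acc).items ++ absA mn ys s dA := by
  intro ys
  induction ys with
  | nil => intro s dA acc h; simp [PySem.List.enumerate_nil, absA]
  | cons c t ih =>
    intro s dA acc hacc
    rw [PySem.List.enumerate_cons]
    simp only [List.foldl_cons]
    rcases h1 : stepA mn (dA, acc) (s, c) with ⟨dA', acc'⟩
    have hsnd : acc' = acc ++ List.replicate (addv mn (dA.getD c 0)).toNat s := by
      have t1 := stepA_snd mn dA acc s c
      rw [h1] at t1; exact t1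
    have hfst : ∀ x, dA'.getD x 0
        = (dA.insert c (dA.getD c 0 + addv mn (dA.getD c 0))).getD x 0 := by
      intro x
      have t1 := stepA_fst_getD mn dA acc s c x
      rw [h1] at t1
      rw [t1, PySem.Dict.getD_insert]
      split_ifs with hx
      · subst hx; rfl
      · rfl
    have hsw := foldA_snd_congr mn t (s + 1) dA'
      (dA.insert c (dA.getD c 0 + addv mn (dA.getD c 0))) acc' hfst
    rw [hsw]
    have hnn : 0 ≤ addv mn (dA.getD c 0) := by unfold addv; omega
    have hbound : ∀ x ∈ acc', x < s + 1 := by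
      intro x hx
      rw [hsnd] at hx
      rcases List.mem_append.mp hx with hx | hx
      · exact lt_trans (hacc x hx) (lt_add_one s)
      · rw [List.eq_of_mem_replicate hx]; exact lt_add_one s
    rw [ih (s + 1) _ acc' hbound, hsnd,
      counter_append_replicate acc s (fun hs => absurd (hacc s hs) (lt_irrefl s))]
    show _ = (PySem.Dict.counter acc).items ++ absA mn (c :: t) s dA
    rw [show absA mn (c :: t) s dA
        = (if addv mn (dA.getD c 0) = 0 then [] else [(s, addv mn (dA.getD c 0))])
            ++ absA mn t (s + 1) (dA.insert c (dA.getD c 0 + addv mn (dA.getD c 0))) from rfl]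
    rw [List.append_assoc]
    congr 1
    congr 1
    by_cases h0 : addv mn (dA.getD c 0) = 0
    · simp [h0]
    · rw [if_neg (by omega : ¬ (addv mn (dA.getD c 0)).toNat = 0), if_neg h0,
        Int.toNat_of_nonneg hnn]

-- clsPairsD at exhausted deficit is empty
lemma clsPairsD_zero : ∀ (l : List Int), clsPairsD 0 l = [] := by
  intro l
  induction l with
  | nil => rfl
  | cons i rest ih => simp [clsPairsD, ih]

-- B's divmod closed form computes the walk clsPairsD
lemma closedB_eq_clsPairsD :
    ∀ (idxs : List Int) (D : Int), 0 ≤ D → closedB D idxs = clsPairsD D idxs := by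
  intro idxs
  induction idxs with
  | nil =>
    intro D hD
    have hq : 0 ≤ PySem.Int.floordiv D 4 := by
      rw [PySem.Int.floordiv_eq_ediv_of_pos (by omega : (0:Int) < 4)]; omega
    have h0 : min (PySem.Int.floordiv D 4) ((([] : List Int).length : Nat) : Int) = 0 := by
      simp; omega
    unfold closedB
    rw [h0]
    simp [clsPairsD, PySem.List.slice]
  | cons i rest ih =>
    intro D hD
    have hqe : PySem.Int.floordiv D 4 = D / 4 :=
      PySem.Int.floordiv_eq_ediv_of_pos (by omega : (0:Int) < 4)
    have hre : PySem.Int.mod D 4 = D % 4 :=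
      PySem.Int.mod_eq_emod_of_pos (by omega : (0:Int) < 4)
    by_cases h4 : D < 4
    · have hq : PySem.Int.floordiv D 4 = 0 := by rw [hqe]; omega
      have hr : PySem.Int.mod D 4 = D := by rw [hre]; omega
      have hfull : min (PySem.Int.floordiv D 4) ((((i :: rest).length : Nat)) : Int) = 0 := by
        rw [hq]; simp; omega
      unfold closedB
      rw [hr, hfull]
      rw [PySem.List.slice_to _ (by omega : (0:Int) ≤ 0)]
      by_cases hD0 : D = 0
      · subst hD0
        rw [if_neg (by simp)]
        simp [clsPairsD, clsPairsD_zero]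
      · rw [if_pos ⟨hD0, by simp⟩]
        have hget : PySem.List.pyGet? (i :: rest) (0 : Int) = some i := by
          simp [PySem.List.pyGet?, PySem.List.pyIdx?]
        rw [hget]
        simp [clsPairsD, show min 4 D = D by omega, clsPairsD_zero, hD0]
    · -- D ≥ 4: head gets 4, recurse with D - 4
      have hih := ih (D - 4) (by omega)
      unfold closedB at hih ⊢
      have hq'e : PySem.Int.floordiv (D - 4) 4 = (D - 4) / 4 :=
        PySem.Int.floordiv_eq_ediv_of_pos (by omega : (0:Int) < 4)
      have hq' : PySem.Int.floordiv (D - 4) 4 = PySem.Int.floordiv D 4 - 1 := by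
        rw [hq'e, hqe]; omega
      have hr' : PySem.Int.mod (D - 4) 4 = PySem.Int.mod D 4 := by
        rw [PySem.Int.mod_eq_emod_of_pos (by omega : (0:Int) < 4), hre]; omega
      have hq1 : 1 ≤ PySem.Int.floordiv D 4 := by rw [hqe]; omega
      have hfull : min (PySem.Int.floordiv D 4) ((((i :: rest).length : Nat)) : Int)
          = min (PySem.Int.floordiv (D - 4) 4) (((rest.length : Nat)) : Int) + 1 := by
        rw [hq']
        simp only [List.length_cons]
        push_cast
        omega
      rw [hr'] at hih
      rw [hfull]
      set f' : Int := min (PySem.Int.floordiv (D - 4) 4) (((rest.length : Nat)) : Int) with hf'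
      have hf'nn : 0 ≤ f' := by
        have h1 : 0 ≤ PySem.Int.floordiv (D - 4) 4 := by rw [hq'e]; omega
        rw [hf']; omega
      -- slice of the cons peels the head
      have hslice : PySem.List.slice (i :: rest) none (some (f' + 1))
          = i :: PySem.List.slice rest none (some f') := by
        rw [PySem.List.slice_to _ (by omega), PySem.List.slice_to _ hf'nn]
        have : (f' + 1).toNat = f'.toNat + 1 := by omega
        rw [this, List.take_succ_cons]
      -- the remainder index shifts by one
      have hcond : (PySem.Int.mod D 4 ≠ 0 ∧ f' + 1 < (((i :: rest).length : Nat) : Int))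
          ↔ (PySem.Int.mod D 4 ≠ 0 ∧ f' < ((rest.length : Nat) : Int)) := by
        have hlen : (((i :: rest).length : Nat) : Int) = ((rest.length : Nat) : Int) + 1 := by
          simp
        constructor
        · rintro ⟨hc1, hc2⟩
          exact ⟨hc1, by omega⟩
        · rintro ⟨hc1, hc2⟩
          exact ⟨hc1, by omega⟩
      have hget : PySem.List.pyGet? (i :: rest) (f' + 1) = PySem.List.pyGet? rest f' := by
        have e1 : PySem.List.pyGet? (i :: rest) (f' + 1) = (i :: rest)[f'.toNat + 1]? := by
          rw [show f' + 1 = ((f'.toNat + 1 : Nat) : Int) by omega, PySem.List.pyGet?_natCast]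
        have e2 : PySem.List.pyGet? rest f' = rest[f'.toNat]? := by
          conv_lhs => rw [show f' = ((f'.toNat : Nat) : Int) by omega]
          rw [PySem.List.pyGet?_natCast]
        rw [e1, e2]
        simp
      have hcls : clsPairsD D (i :: rest) = (i, (4:Int)) :: clsPairsD (D - 4) rest := by
        rw [show clsPairsD D (i :: rest)
            = (if min 4 D = 0 then [] else [(i, min 4 D)]) ++ clsPairsD (D - min 4 D) rest
            from rfl, show min 4 D = 4 by omega]
        norm_num
      rw [hslice, hget, hcls, ← hih]
      simp only [List.map_cons, List.cons_append]
      congr 2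
      split_ifs with hc1 hc2 hc2
      · rfl
      · exact absurd (hcond.mp hc1) hc2
      · exact absurd (hcond.mpr hc2) hc1
      · rfl

-- posList unfolds through a cons
lemma posList_cons_self (c : Int) (t : List Int) (s : Int) :
    posList c (c :: t) s = s :: posList c t (s + 1) := by
  simp [posList, PySem.List.enumerate_cons]

lemma posList_cons_ne (c c' : Int) (t : List Int) (s : Int) (h : c' ≠ c) :
    posList c' (c :: t) s = posList c' t (s + 1) := by
  unfold posList
  rw [PySem.List.enumerate_cons,
    List.filter_cons_of_neg (by simp; exact fun e => h e.symm)]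

lemma posList_not_mem (c : Int) : ∀ (ys : List Int) (s : Int), c ∉ ys → posList c ys s = [] := by
  intro ys
  induction ys with
  | nil => intro s _; rfl
  | cons a t ih =>
    intro s h
    have hne : c ≠ a := fun e => h (e ▸ List.mem_cons_self)
    rw [posList_cons_ne a c t s hne]
    exact ih (s + 1) (fun hm => h (List.mem_cons_of_mem _ hm))

lemma length_posList (c : Int) : ∀ (ys : List Int) (s : Int),
    (posList c ys s).length = ys.count c := by
  intro ys
  induction ys with
  | nil => intro s; rfl
  | cons a t ih =>
    intro s
    by_cases h : c = a
    · subst h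
      rw [posList_cons_self]
      simp [ih (s + 1)]
    · rw [posList_cons_ne a c t s h]
      have h' : ¬ a = c := fun e => h e.symm
      simp [h', ih (s + 1)]

-- absA is a rearrangement of the per-class plans (B's grouping)
lemma absA_perm (mn : Int) :
    ∀ (ys : List Int) (s : Int) (d : PySem.Dict Int Int),
      (absA mn ys s d).Perm
        (((PySem.List.dedup ys).map
            (fun c => clsPairsD (max 0 (mn - d.getD c 0)) (posList c ys s))).flatten) := by
  intro ys
  induction ys with
  | nil => intro s d; simp [absA, PySem.List.dedup, PySem.Set.ofList_nil]
  | cons c t ih =>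
    intro s d
    set dc := d.getD c 0 with hdc
    set a := addv mn dc with ha
    set D := max 0 (mn - dc) with hD
    have haD : a = min 4 D := rfl
    have hDa : ∀ x : Int, x = dc + a → max 0 (mn - x) = D - a := by
      intro x hx; subst hx; rw [haD, hD]; unfold addv at ha; omega
    set d' := d.insert c (dc + a) with hd'
    have hd'c : d'.getD c 0 = dc + a := by
      rw [hd', PySem.Dict.getD_insert, if_pos rfl]
    have hd'ne : ∀ c', c' ≠ c → d'.getD c' 0 = d.getD c' 0 := by
      intro c' hne; rw [hd', PySem.Dict.getD_insert, if_neg hne]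
    set F : Int → List (Int × Int) :=
      fun c' => clsPairsD (max 0 (mn - d'.getD c' 0)) (posList c' t (s + 1)) with hF
    have hstep : absA mn (c :: t) s d
        = (if a = 0 then [] else [(s, a)]) ++ absA mn t (s + 1) d' := rfl
    have hdedup : PySem.List.dedup (c :: t) = c :: PySem.Set.discard (PySem.List.dedup t) c := by
      unfold PySem.List.dedup
      exact PySem.Set.ofList_cons c t
    -- head class's plan peels its first index
    have hhead : clsPairsD (max 0 (mn - d.getD c 0)) (posList c (c :: t) s)
        = (if a = 0 then [] else [(s, a)]) ++ F c := by
      rw [posList_cons_self, ← hdc, ← hD]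
      show (if min 4 D = 0 then [] else [(s, min 4 D)])
            ++ clsPairsD (D - min 4 D) (posList c t (s + 1))
          = (if a = 0 then [] else [(s, a)])
            ++ clsPairsD (max 0 (mn - d'.getD c 0)) (posList c t (s + 1))
      rw [hd'c, hDa (dc + a) rfl, ← haD]
    -- other classes' plans are unchanged by the insert and the cons
    have hothers : (PySem.Set.discard (PySem.List.dedup t) c).map
          (fun c' => clsPairsD (max 0 (mn - d.getD c' 0)) (posList c' (c :: t) s))
        = (PySem.Set.discard (PySem.List.dedup t) c).map F := by
      apply List.map_congr_left
      intro c' hc'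
      have hne : c' ≠ c := by
        have := List.of_mem_filter hc'
        simpa using this
      rw [posList_cons_ne c c' t s hne]
      show clsPairsD (max 0 (mn - d.getD c' 0)) (posList c' t (s + 1))
          = clsPairsD (max 0 (mn - d'.getD c' 0)) (posList c' t (s + 1))
      rw [hd'ne c' hne]
    -- pull class c's tail plan out of the flatten over dedup t
    have hpull : (((PySem.List.dedup t).map F).flatten).Perm
        (F c ++ ((PySem.Set.discard (PySem.List.dedup t) c).map F).flatten) := by
      by_cases hct : c ∈ t
      · have hmem : c ∈ PySem.List.dedup t := by
          unfold PySem.List.dedup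
          exact (PySem.Set.mem_ofList t c).mpr hct
        have hnd : (PySem.List.dedup t).Nodup := by
          unfold PySem.List.dedup
          exact PySem.Set.nodup_ofList t
        have hdisc : PySem.Set.discard (PySem.List.dedup t) c = (PySem.List.dedup t).erase c := by
          rw [hnd.erase_eq_filter c]
          rfl
        have hperm : (PySem.List.dedup t).Perm (c :: (PySem.List.dedup t).erase c) :=
          List.perm_cons_erase hmem
        have := (hperm.map F).flatten
        rw [hdisc]
        simpa using this
      · have hnot : c ∉ PySem.List.dedup t := by
          unfold PySem.List.dedup
          exact fun h => hct ((PySem.Set.mem_ofList t c).mp h)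
        have hFc : F c = [] := by
          show clsPairsD (max 0 (mn - d'.getD c 0)) (posList c t (s + 1)) = []
          rw [posList_not_mem c t (s + 1) hct]
          rfl
        have hdisc : PySem.Set.discard (PySem.List.dedup t) c = PySem.List.dedup t := by
          apply List.filter_eq_self.mpr
          intro b hb
          have : b ≠ c := fun e => hnot (e ▸ hb)
          simpa using this
        rw [hFc, hdisc]
        simp
    have hfin : (if a = 0 then [] else [(s, a)])
          ++ (F c ++ ((PySem.Set.discard (PySem.List.dedup t) c).map F).flatten)
        = (((PySem.List.dedup (c :: t)).map
            (fun c' => clsPairsD (max 0 (mn - d.getD c' 0)) (posList c' (c :: t) s))).flatten) := by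
      rw [hdedup]
      simp only [List.map_cons, List.flatten_cons]
      rw [hhead, hothers, List.append_assoc]
    rw [hstep]
    exact hfin ▸ ((List.Perm.append_left _ (ih (s + 1) d')).trans
      (List.Perm.append_left _ hpull))

-- every index absA emits is ≥ the running position
lemma absA_fst_ge (mn : Int) :
    ∀ (ys : List Int) (s : Int) (d : PySem.Dict Int Int) (p : Int × Int),
      p ∈ absA mn ys s d → s ≤ p.1 := by
  intro ys
  induction ys with
  | nil => intro s d p h; simp [absA] at h
  | cons c t ih =>
    intro s d p h
    rw [show absA mn (c :: t) s d
        = (if addv mn (d.getD c 0) = 0 then [] else [(s, addv mn (d.getD c 0))])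
            ++ absA mn t (s + 1) (d.insert c (d.getD c 0 + addv mn (d.getD c 0))) from rfl] at h
    rcases List.mem_append.mp h with h | h
    · split_ifs at h with h0
      · simp at h
      · simp at h
        rw [h]
    · have := ih (s + 1) _ p h
      omega

-- absA's indices are strictly increasing
lemma absA_pairwise (mn : Int) :
    ∀ (ys : List Int) (s : Int) (d : PySem.Dict Int Int),
      (absA mn ys s d).Pairwise (fun p q => p.1 < q.1) := by
  intro ys
  induction ys with
  | nil => intro s d; simp [absA]
  | cons c t ih =>
    intro s d
    rw [show absA mn (c :: t) s d
        = (if addv mn (d.getD c 0) = 0 then [] else [(s, addv mn (d.getD c 0))])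
            ++ absA mn t (s + 1) (d.insert c (d.getD c 0 + addv mn (d.getD c 0))) from rfl]
    apply List.pairwise_append.mpr
    refine ⟨?_, ih (s + 1) _, ?_⟩
    · split_ifs <;> simp
    · intro p hp q hq
      have hq' := absA_fst_ge mn t (s + 1) _ q hq
      split_ifs at hp with h0
      · simp at hp
      · simp at hp
        rw [hp]
        exact lt_of_lt_of_le (by omega) hq'

-- B's loop body, named: it appends class c's closed-form plan
lemma planB_eq (mn : Int) (y : List Int) (pairs : List (Int × Int)) (c : Int) :
    planB mn y pairs c
      = pairs ++ closedB (max 0 (mn - ((posList c y 0).length : Int))) (posList c y 0) := by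
  simp only [planB, closedB, posList]
  split_ifs with hc
  · rw [List.append_assoc]
  · rw [List.append_nil]

-- B's fold over the distinct classes is the flatten of the per-class plans
lemma foldB (mn : Int) (y : List Int) :
    ∀ (cs : List Int) (pairs : List (Int × Int)),
      cs.foldl (planB mn y) pairs
        = pairs ++ (cs.map (fun c => closedB (max 0 (mn - ((posList c y 0).length : Int)))
            (posList c y 0))).flatten := by
  intro cs
  induction cs with
  | nil => intro pairs; simp
  | cons c cs ihc =>
    intro pairs
    rw [List.foldl_cons, planB_eq, ihc, List.map_cons, List.flatten_cons, List.append_assoc]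

-- ===== VERDICT (by name: the statement is the Claim_ definition above) =====
theorem get_trans_indices_spec : Claim_equal_get_trans_indices := by
  intro X y name _ _
  unfold Spec_get_trans_indices get_trans_indices get_trans_indices_alt
  set mn : Int :=
    (((PySem.Dict.ofList [("tr", (900:Int)), ("va", 150), ("ts", 300)]).get? name).getD 0) with hmn
  -- A's side: the fold is absA
  have hA : (PySem.Dict.counter
        (((PySem.List.enumerate y 0).foldl (stepA mn) (PySem.Dict.counter y, ([] : List Int))).2)).items
      = absA mn y 0 (PySem.Dict.counter y) := by
    rw [countA mn y 0 (PySem.Dict.counter y) [] (by intro x hx; simp at hx)]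
    rfl
  rw [hA]
  show absA mn y 0 (PySem.Dict.counter y)
      = (PySem.Dict.ofList (PySem.List.sorted
          ((PySem.List.dedup y).foldl (planB mn y) []) (fun p => p.1) false)).items
  rw [foldB mn y (PySem.List.dedup y) [], List.nil_append]
  -- each plan in closed form is the walk, with deficit from the class count
  have hplans : (PySem.List.dedup y).map
        (fun c => closedB (max 0 (mn - ((posList c y 0).length : Int))) (posList c y 0))
      = (PySem.List.dedup y).map
        (fun c => clsPairsD (max 0 (mn - (PySem.Dict.counter y).getD c 0)) (posList c y 0)) := by
    apply List.map_congr_left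
    intro c _
    rw [closedB_eq_clsPairsD _ _ (by omega)]
    rw [PySem.Dict.getD_counter, length_posList]
  rw [hplans]
  -- absA is the strictly-index-increasing rearrangement of the flatten, so it is its sort
  have hperm := absA_perm mn y 0 (PySem.Dict.counter y)
  have hsorted := PySem.List.sorted_eq_of_perm_of_pairwise_lt
    (((PySem.List.dedup y).map
        (fun c => clsPairsD (max 0 (mn - (PySem.Dict.counter y).getD c 0)) (posList c y 0))).flatten)
    (absA mn y 0 (PySem.Dict.counter y)) (fun p => p.1) hperm
    (absA_pairwise mn y 0 (PySem.Dict.counter y))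
  rw [hsorted]
  -- dict(pairs) over distinct keys returns the pairs themselves
  have hnodup : ((absA mn y 0 (PySem.Dict.counter y)).map Prod.fst).Nodup := by
    have hp := absA_pairwise mn y 0 (PySem.Dict.counter y)
    exact (List.pairwise_map.mpr hp).imp (fun h => ne_of_lt h)
  rw [show PySem.Dict.ofList (absA mn y 0 (PySem.Dict.counter y))
      = (absA mn y 0 (PySem.Dict.counter y)).foldl
          (fun d p => d.insert p.1 p.2) PySem.Dict.empty from rfl]
  rw [PySem.Dict.items_foldl_insert_fresh _ Prod.fst Prod.snd PySem.Dict.empty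
    (by intro a _; rfl) hnodup]
  simp [show (PySem.Dict.empty : PySem.Dict Int Int).items = [] from rfl]
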